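-- pv_equiv track=rewrite | github.com/dongdong867/pyct | examples/solver_hard/pattern_matching_dispatcher.py | _match_single_wildcard
-- ===== SOURCE A (Python) =====
-- def _match_single_wildcard(pattern: str, text: str) -> str:
--     """Handle patterns with exactly one '?' wildcard."""
--     if len(pattern) != len(text):
--         return "no_match"
--     for i in range(len(pattern)):
--         if pattern[i] == "?":
--             continue
--         if pattern[i] != text[i]:
--             return "no_match"
--     return "full_match"
-- ===== SOURCE B (Python) =====
-- def _match_single_wildcard(pattern: str, text: str) -> str:
--     """Segment matching: split the pattern at '?' and compare each literal
--     segment against the corresponding slice of the text."""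
--     if len(pattern) != len(text):
--         return "no_match"
--     rest = text
--     for seg in pattern.split("?"):
--         if rest[:len(seg)] != seg:
--             return "no_match"
--         rest = rest[len(seg) + 1:]
--     return "full_match"
-- ===== Notes on version B (the rewrite author's own statement) =====
-- stated objective: alternative
-- what changed: Replaces the per-character index loop by splitting the pattern at '?' into literal segments and comparing each segment against the corresponding slice of the text.
import Mathlib
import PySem

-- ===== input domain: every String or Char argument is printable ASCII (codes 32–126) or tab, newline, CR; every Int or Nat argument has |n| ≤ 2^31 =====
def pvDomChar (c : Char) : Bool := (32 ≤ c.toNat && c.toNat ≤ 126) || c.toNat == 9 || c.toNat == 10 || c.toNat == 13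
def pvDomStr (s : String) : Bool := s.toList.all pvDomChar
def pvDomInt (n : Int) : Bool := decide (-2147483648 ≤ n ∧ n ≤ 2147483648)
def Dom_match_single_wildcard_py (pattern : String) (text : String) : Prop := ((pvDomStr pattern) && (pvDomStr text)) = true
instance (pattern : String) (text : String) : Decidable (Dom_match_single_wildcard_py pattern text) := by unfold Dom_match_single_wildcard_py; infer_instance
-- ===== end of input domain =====

-- B replaces A's per-character index loop by splitting the pattern at '?' into literal
-- segments and comparing each segment against the corresponding slice of the text
-- (objective: alternative — segment/slice comparisons instead of a char loop).

-- ===== PORT A =====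
-- the 'for i in range(len(pattern))' loop with its early return "no_match"
def pvALoop (p t : List Char) : List Int → String
  | [] => "full_match"
  | i :: rest =>
    match PySem.List.pyGet? p i with
    | none => "no_match"   -- unreachable: i is always in range (Python would raise IndexError)
    | some pc =>
      if pc = '?' then pvALoop p t rest
      else
        match PySem.List.pyGet? t i with
        | none => "no_match"   -- unreachable likewise
        | some tc =>
          if pc ≠ tc then "no_match" else pvALoop p t rest

def match_single_wildcard_py (pattern : String) (text : String) : String :=
  if PySem.Str.len pattern ≠ PySem.Str.len text then "no_match"
  else pvALoop pattern.toList text.toList (PySem.List.pyRange 0 (PySem.Str.len pattern) 1)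

-- ===== PORT B =====
-- the 'for seg in pattern.split("?")' loop of Source B; rest[:len(seg)] and rest[len(seg)+1:]
def pvBLoop : List (List Char) → List Char → String
  | [], _ => "full_match"
  | seg :: segs, rest =>
    if PySem.List.slice rest none (some (seg.length : Int)) ≠ seg then "no_match"
    else pvBLoop segs (PySem.List.slice rest (some ((seg.length : Int) + 1)) none)

def match_single_wildcard_py_alt (pattern : String) (text : String) : String :=
  if PySem.Str.len pattern ≠ PySem.Str.len text then "no_match"
  else pvBLoop (PySem.Chars.splitOn pattern.toList ['?']) text.toList

-- ===== PRECONDITION & SPEC =====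
def Spec_match_single_wildcard_py (pattern : String) (text : String) (out : String) : Prop := out = match_single_wildcard_py_alt pattern text
instance (pattern : String) (text : String) (out : String) : Decidable (Spec_match_single_wildcard_py pattern text out) := by unfold Spec_match_single_wildcard_py; infer_instance

-- ===== CLAIM (what is proved, stated in full; the proofs are below) =====
def Claim_equal_match_single_wildcard_py : Prop := ∀ (pattern : String) (text : String), Dom_match_single_wildcard_py pattern text → Spec_match_single_wildcard_py pattern text (match_single_wildcard_py pattern text)

-- ===== LEMMAS AND PROOFS =====

-- structural version of pattern.split('?') (Python split with a one-char separator)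
def pvSplitQ : List Char → List (List Char)
  | [] => [[]]
  | c :: rest =>
    if c = '?' then [] :: pvSplitQ rest
    else match pvSplitQ rest with
      | [] => [[c]]          -- unreachable: pvSplitQ never returns []
      | h :: tl => (c :: h) :: tl

-- common spec: characterwise match (on equal-length lists)
def pvM : List Char → List Char → Bool
  | [], _ => true
  | _, [] => true
  | c :: p, d :: t => (c == '?' || c == d) && pvM p t

def pvConsHead (x : List Char) : List (List Char) → List (List Char)
  | [] => [x]
  | h :: tl => (x ++ h) :: tl

lemma pvSplitQ_ne_nil (p : List Char) : pvSplitQ p ≠ [] := by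
  rcases p with _ | ⟨c, r⟩
  · simp [pvSplitQ]
  · by_cases h : c = '?'
    · simp [pvSplitQ, h]
    · simp only [pvSplitQ, if_neg h]
      rcases pvSplitQ r with _ | ⟨h0, tl⟩ <;> simp

lemma pvSplitQ_q (r : List Char) : pvSplitQ ('?' :: r) = [] :: pvSplitQ r := by
  simp [pvSplitQ]

lemma pvSplitQ_c (c : Char) (r h0 : List Char) (tl : List (List Char)) (hc : c ≠ '?')
    (hs : pvSplitQ r = h0 :: tl) : pvSplitQ (c :: r) = (c :: h0) :: tl := by
  simp [pvSplitQ, hc, hs]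

lemma pvGo_nil (f : Nat) (cur : List Char) (acc : List (List Char)) :
    PySem.Chars.splitOn.go ['?'] f [] cur acc = (cur.reverse :: acc).reverse := by
  cases f <;> simp [PySem.Chars.splitOn.go]

lemma pvGo_cons_q (f : Nat) (l cur : List Char) (acc : List (List Char)) :
    PySem.Chars.splitOn.go ['?'] (f+1) ('?'::l) cur acc
      = PySem.Chars.splitOn.go ['?'] f l [] (cur.reverse :: acc) := by
  simp [PySem.Chars.splitOn.go, List.isPrefixOf]

lemma pvGo_cons (f : Nat) (c : Char) (h : c ≠ '?') (l cur : List Char) (acc : List (List Char)) :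
    PySem.Chars.splitOn.go ['?'] (f+1) (c::l) cur acc
      = PySem.Chars.splitOn.go ['?'] f l (c::cur) acc := by
  simp [PySem.Chars.splitOn.go, List.isPrefixOf, Ne.symm h]

lemma pvGo_spec (l : List Char) : ∀ (fuel : Nat) (cur : List Char) (acc : List (List Char)),
    l.length ≤ fuel →
    PySem.Chars.splitOn.go ['?'] fuel l cur acc
      = acc.reverse ++ pvConsHead cur.reverse (pvSplitQ l) := by
  induction l with
  | nil =>
    intro fuel cur acc _
    rw [pvGo_nil]
    simp [pvSplitQ, pvConsHead]
  | cons c r ih =>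
    intro fuel cur acc hle
    rcases fuel with _ | f
    · simp at hle
    · by_cases hc : c = '?'
      · subst hc
        rw [pvGo_cons_q, ih f [] (cur.reverse :: acc) (by simpa using Nat.le_of_succ_le_succ hle)]
        have hne := pvSplitQ_ne_nil r
        rcases hs : pvSplitQ r with _ | ⟨h0, tl⟩
        · exact absurd hs hne
        · simp [pvSplitQ, pvConsHead, hs]
      · rw [pvGo_cons f c hc, ih f (c :: cur) acc (by simpa using Nat.le_of_succ_le_succ hle)]
        have hne := pvSplitQ_ne_nil r
        rcases hs : pvSplitQ r with _ | ⟨h0, tl⟩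
        · exact absurd hs hne
        · simp [pvSplitQ, pvConsHead, hs, hc]

lemma pvSplitOn_eq (p : List Char) : PySem.Chars.splitOn p ['?'] = pvSplitQ p := by
  unfold PySem.Chars.splitOn
  rw [pvGo_spec p (p.length + 1) [] [] (by omega)]
  have hne := pvSplitQ_ne_nil p
  rcases hs : pvSplitQ p with _ | ⟨h0, tl⟩
  · exact absurd hs hne
  · simp [pvConsHead]

-- A's loop over indices k..n-1 checks exactly the characterwise match of the dropped tails
lemma pvALoop_gen (d : Nat) : ∀ (k n : Nat) (p t : List Char), d = n - k → k ≤ n →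
    p.length = n → t.length = n →
    pvALoop p t (PySem.List.pyRange (k : Int) (n : Int) 1)
      = if pvM (p.drop k) (t.drop k) then "full_match" else "no_match" := by
  induction d with
  | zero =>
    intro k n p t hd hk hp ht
    have hkn : k = n := by omega
    subst hkn
    rw [PySem.List.pyRange_one_eq_nil (le_refl _)]
    have hp0 : p.drop k = [] := List.drop_eq_nil_of_le (le_of_eq hp)
    have ht0 : t.drop k = [] := List.drop_eq_nil_of_le (le_of_eq ht)
    simp [pvALoop, hp0, ht0, pvM]
  | succ d ih =>
    intro k n p t hd hk hp ht
    have hkn : k < n := by omega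
    rw [PySem.List.pyRange_one_cons (by exact_mod_cast hkn)]
    have hkp : k < p.length := by omega
    have hkt : k < t.length := by omega
    have hgp : PySem.List.pyGet? p (k : Int) = some p[k] := by
      simp [PySem.List.pyGet?_natCast, List.getElem?_eq_getElem hkp]
    have hgt : PySem.List.pyGet? t (k : Int) = some t[k] := by
      simp [PySem.List.pyGet?_natCast, List.getElem?_eq_getElem hkt]
    have hdp : p.drop k = p[k] :: p.drop (k+1) := List.drop_eq_getElem_cons hkp
    have hdt : t.drop k = t[k] :: t.drop (k+1) := List.drop_eq_getElem_cons hkt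
    have hrec : ((k : Int) + 1) = ((k + 1 : Nat) : Int) := by push_cast; ring
    have ihk := ih (k+1) n p t (by omega) (by omega) hp ht
    by_cases hq : p[k] = '?'
    · simp only [pvALoop, hgp, hdp, hdt, pvM, hq]
      rw [hrec, ihk]
      simp
    · by_cases he : p[k] = t[k]
      · simp only [pvALoop, hgp, hgt, if_neg hq, hdp, hdt, pvM]
        rw [if_neg (by simpa using he), hrec, ihk]
        simp [he]
      · simp only [pvALoop, hgp, hgt, if_neg hq, hdp, hdt, pvM]
        rw [if_pos (by simpa using he)]
        simp [hq, he]

-- B's segment loop computes the same characterwise match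
lemma pvBLoop_eq : ∀ (p t : List Char), t.length = p.length →
    pvBLoop (pvSplitQ p) t = if pvM p t then "full_match" else "no_match" := by
  intro p
  induction p with
  | nil =>
    intro t _
    simp only [pvSplitQ, pvBLoop]
    rw [if_neg (by simp only [ne_eq, not_not]; rw [PySem.List.slice_to_natCast]; simp)]
    simp [pvM]
  | cons c r ih =>
    intro t hlen
    rcases t with _ | ⟨dch, t'⟩
    · simp at hlen
    · have hlen' : t'.length = r.length := by simpa using hlen
      by_cases hc : c = '?'
      · subst hc
        rw [pvSplitQ_q]
        simp only [pvBLoop]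
        rw [if_neg (by simp only [ne_eq, not_not]; rw [PySem.List.slice_to_natCast]; simp)]
        rw [show ((([] : List Char).length : Int) + 1) = ((1 : Nat) : Int) by simp,
          PySem.List.slice_from_natCast,
          show List.drop 1 (dch :: t') = t' from rfl, ih t' hlen']
        simp [pvM]
      · have hne := pvSplitQ_ne_nil r
        rcases hs : pvSplitQ r with _ | ⟨h0, tl⟩
        · exact absurd hs hne
        · rw [pvSplitQ_c c r h0 tl hc hs]
          simp only [pvBLoop]
          have htake : PySem.List.slice (dch :: t') none (some (((c :: h0).length : Int)))
              = dch :: t'.take h0.length := by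
            rw [PySem.List.slice_to_natCast]; simp
          have hdrop : PySem.List.slice (dch :: t') (some (((c :: h0).length : Int) + 1)) none
              = t'.drop (h0.length + 1) := by
            rw [show (((c :: h0).length : Int) + 1) = ((h0.length + 2 : Nat) : Int) by push_cast [List.length_cons]; ring,
              PySem.List.slice_from_natCast]
            simp
          rw [htake, hdrop]
          by_cases hd : c = dch
          · subst hd
            have hih := ih t' hlen'
            rw [hs] at hih
            simp only [pvBLoop] at hih
            have htake' : PySem.List.slice t' none (some ((h0.length : Int)))
                = t'.take h0.length := by rw [PySem.List.slice_to_natCast]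
            have hdrop' : PySem.List.slice t' (some ((h0.length : Int) + 1)) none
                = t'.drop (h0.length + 1) := by
              rw [show ((h0.length : Int) + 1) = ((h0.length + 1 : Nat) : Int) by push_cast; ring,
                PySem.List.slice_from_natCast]
            rw [htake', hdrop'] at hih
            have hMc : pvM (c :: r) (c :: t') = pvM r t' := by simp [pvM]
            by_cases hseg : t'.take h0.length = h0
            · rw [if_neg (by simp [hseg])]
              rw [if_neg (by simp [hseg])] at hih
              rw [hih, hMc]
            · rw [if_pos (by simp [hseg])]
              rw [if_pos (by simp [hseg])] at hih
              rw [hMc, ← hih]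
          · rw [if_pos (by simp [(Ne.symm hd : dch ≠ c)])]
            simp [pvM, hc, hd]

-- ===== VERDICT (by name: the statement is the Claim_ definition above) =====
theorem match_single_wildcard_py_spec : Claim_equal_match_single_wildcard_py := by
  unfold Claim_equal_match_single_wildcard_py Spec_match_single_wildcard_py
  intro pattern text _
  unfold match_single_wildcard_py match_single_wildcard_py_alt
  by_cases hlen : PySem.Str.len pattern = PySem.Str.len text
  · rw [if_neg (by simpa using hlen), if_neg (by simpa using hlen)]
    have hlen' : pattern.toList.length = text.toList.length := by
      simpa [PySem.Str.len_eq] using hlen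
    have hA := pvALoop_gen pattern.toList.length 0 pattern.toList.length
      pattern.toList text.toList (by omega) (by omega) rfl hlen'.symm
    simp only [List.drop_zero, Nat.cast_zero] at hA
    have hlenInt : PySem.Str.len pattern = (pattern.toList.length : Int) := by
      simp [PySem.Str.len_eq]
    rw [hlenInt, hA, pvSplitOn_eq, pvBLoop_eq pattern.toList text.toList hlen'.symm]
    rfl
  · rw [if_pos (by simpa using hlen), if_pos (by simpa using hlen)]
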